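-- pv_equiv track=rewrite | github.com/richardzhux/iching | tools/prepare_english.py | _clean_block
-- ===== SOURCE A (Python) =====
-- from typing import Dict, List, Sequence
--
-- def _clean_block(lines: Sequence[str]) -> str:
--     content = list(lines)
--     while content and not content[0]:
--         content.pop(0)
--     while content and not content[-1]:
--         content.pop()
--
--     squashed: List[str] = []
--     previous_blank = False
--     for line in content:
--         blank = not line
--         if blank and previous_blank:
--             continue
--         squashed.append(line)
--         previous_blank = blank
--     return "\n".join(squashed).strip()
-- ===== SOURCE B (Python) =====
-- from typing import List, Sequence
--
--
-- def _clean_block(lines: Sequence[str]) -> str: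
--     # Rebuild the text from paragraphs: partition the lines into maximal runs
--     # of non-empty lines, join each paragraph with "\n" and the paragraphs
--     # with "\n\n".  Empty lines never appear in the output, so no trimming or
--     # blank-collapsing is needed; the final strip() handles whitespace-only
--     # material at the edges (e.g. a first line of spaces).
--     paragraphs: List[List[str]] = []
--     current: List[str] = []
--     for line in lines:
--         if line:
--             current.append(line)
--         elif current:
--             paragraphs.append(current)
--             current = []
--     if current:
--         paragraphs.append(current)
--     return "\n\n".join("\n".join(p) for p in paragraphs).strip()
-- ===== Notes on version B (the rewrite author's own statement) =====
-- stated objective: simpler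
-- what changed: B rebuilds the text from paragraphs: one pass partitions the lines into maximal runs of non-empty lines, then joins each paragraph with '\n' and the paragraphs with '\n\n' -- it never trims and never emits blank lines, replacing A's two pop-loops plus flag-carrying blank-collapse loop.
import Mathlib
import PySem

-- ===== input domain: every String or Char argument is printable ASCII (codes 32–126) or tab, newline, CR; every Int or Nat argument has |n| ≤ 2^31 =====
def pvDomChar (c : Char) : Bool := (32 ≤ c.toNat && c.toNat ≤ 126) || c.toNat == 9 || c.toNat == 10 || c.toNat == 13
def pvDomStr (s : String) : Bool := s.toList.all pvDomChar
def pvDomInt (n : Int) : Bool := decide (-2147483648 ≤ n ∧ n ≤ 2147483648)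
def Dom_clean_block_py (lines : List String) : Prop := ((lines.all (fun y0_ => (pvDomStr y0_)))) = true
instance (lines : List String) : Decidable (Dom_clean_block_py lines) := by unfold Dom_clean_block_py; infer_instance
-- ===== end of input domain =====

-- B rebuilds the text from paragraphs (maximal runs of non-empty lines, joined with "\n\n")
-- instead of A's trim loops plus flag-carrying blank-collapse loop: simpler.

-- ===== PORT A =====
-- 'while content and not content[0]: content.pop(0)'
def pvPopLead : List String → List String
  | [] => []
  | x :: xs => if x == "" then pvPopLead xs else x :: xs

-- 'while content and not content[-1]: content.pop()'
def pvPopTrail : List String → List String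
  | [] => []
  | x :: xs =>
    match pvPopTrail xs with
    | [] => if x == "" then [] else [x]
    | ys => x :: ys

def clean_block_py (lines : List String) : String :=
  let content := pvPopTrail (pvPopLead lines)
  -- for line in content: blank = not line; skip if blank and previous_blank; else append
  let sq := (content.foldl
    (fun (st : List String × Bool) line =>
      let blank := line == ""
      if blank && st.2 then st else (st.1 ++ [line], blank))
    ([], false)).1
  PySem.Str.strip (PySem.Str.join "\n" sq)

-- ===== PORT B =====
def clean_block_py_alt (lines : List String) : String :=
  -- for line in lines: if line: current.append(line) elif current: flush
  let st := lines.foldl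
    (fun (st : List (List String) × List String) line =>
      if line == "" then
        (if st.2 == ([] : List String) then st else (st.1 ++ [st.2], []))
      else (st.1, st.2 ++ [line]))
    ([], [])
  -- if current: paragraphs.append(current)
  let paragraphs := if st.2 == ([] : List String) then st.1 else st.1 ++ [st.2]
  PySem.Str.strip (PySem.Str.join "\n\n" (paragraphs.map (PySem.Str.join "\n")))

-- ===== PRECONDITION & SPEC =====
def Spec_clean_block_py (lines : List String) (out : String) : Prop := out = clean_block_py_alt lines
instance (lines : List String) (out : String) : Decidable (Spec_clean_block_py lines out) := by unfold Spec_clean_block_py; infer_instance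

-- ===== CLAIM (what is proved, stated in full; the proofs are below) =====
def Claim_equal_clean_block_py : Prop := ∀ (lines : List String), Dom_clean_block_py lines → Spec_clean_block_py lines (clean_block_py lines)

-- ===== LEMMAS AND PROOFS =====

-- the squash loop as a structural recursion (proof helper for A)
def pvSquash : List String → Bool → List String
  | [], _ => []
  | x :: xs, prev => if (x == "") && prev then pvSquash xs prev else x :: pvSquash xs (x == "")

-- B's paragraph loop as a structural recursion (proof helper for B)
def pvGo : List String → List (List String) → List String → List (List String)
  | [], P, cur => if cur = [] then P else P ++ [cur]
  | x :: xs, P, cur =>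
    if x = "" then pvGo xs (if cur = [] then P else P ++ [cur]) []
    else pvGo xs P (cur ++ [x])

-- "\n".join of a paragraph list with single empty-line separators (proof helper)
def pvInter : List (List String) → List String
  | [] => []
  | [p] => p
  | p :: q :: rest => p ++ [""] ++ pvInter (q :: rest)

theorem pvFoldA (xs : List String) (acc : List String) (prev : Bool) :
    (xs.foldl
      (fun (st : List String × Bool) line =>
        let blank := line == ""
        if blank && st.2 then st else (st.1 ++ [line], blank))
      (acc, prev)).1 = acc ++ pvSquash xs prev := by
  induction xs generalizing acc prev with
  | nil => simp [pvSquash]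
  | cons x xs ih =>
    by_cases h : ((x == "") && prev) = true
    · rw [List.foldl_cons]
      have hinit : (let blank := x == "";
          if (blank && (acc, prev).2) = true then (acc, prev)
          else ((acc, prev).1 ++ [x], blank)) = (acc, prev) := by simp [h]
      rw [hinit, ih]
      simp [pvSquash, h]
    · rw [List.foldl_cons]
      have hinit : (let blank := x == "";
          if (blank && (acc, prev).2) = true then (acc, prev)
          else ((acc, prev).1 ++ [x], blank)) = (acc ++ [x], x == "") := by simp [h]
      rw [hinit, ih]
      simp [pvSquash, h]

theorem pvFoldB (xs : List String) (P : List (List String)) (cur : List String) :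
    (let st := xs.foldl
        (fun (st : List (List String) × List String) line =>
          if line == "" then
            (if st.2 == ([] : List String) then st else (st.1 ++ [st.2], []))
          else (st.1, st.2 ++ [line]))
        (P, cur);
      if st.2 == ([] : List String) then st.1 else st.1 ++ [st.2]) = pvGo xs P cur := by
  induction xs generalizing P cur with
  | nil => simp only [List.foldl_nil, pvGo]; split_ifs with h1 h2 h2 <;> simp_all
  | cons x xs ih =>
    by_cases hx : x = ""
    · by_cases hc : cur = []
      · simpa [hx, hc, pvGo] using ih P []
      · simpa [hx, hc, pvGo] using ih (P ++ [cur]) []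
    · simpa [hx, pvGo] using ih P (cur ++ [x])

theorem pvGo_prefix (xs : List String) (P : List (List String)) (cur : List String) :
    pvGo xs P cur = P ++ pvGo xs [] cur := by
  induction xs generalizing P cur with
  | nil => simp only [pvGo]; split_ifs <;> simp
  | cons x xs ih =>
    rw [pvGo, pvGo]
    by_cases hx : x = ""
    · rw [if_pos hx, if_pos hx]
      by_cases hc : cur = []
      · rw [if_pos hc, if_pos hc]
        exact ih P []
      · rw [if_neg hc, if_neg hc, ih (P ++ [cur]) [], ih ([] ++ [cur]) []]
        simp
    · rw [if_neg hx, if_neg hx]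
      exact ih P (cur ++ [x])

theorem pvGo_ne_nil (xs : List String) (P : List (List String)) (cur : List String)
    (hP : ∀ p ∈ P, p ≠ []) :
    ∀ p ∈ pvGo xs P cur, p ≠ [] := by
  induction xs generalizing P cur with
  | nil =>
    intro p hp
    simp only [pvGo] at hp
    split_ifs at hp with h
    · exact hP p hp
    · rcases List.mem_append.mp hp with h1 | h1
      · exact hP p h1
      · simp at h1; subst h1; exact h
  | cons x xs ih =>
    intro p hp
    by_cases hx : x = ""
    · by_cases hc : cur = []
      · simp only [pvGo, hx, if_pos rfl, hc, if_pos rfl] at hp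
        exact ih P [] hP p hp
      · simp only [pvGo, hx, if_pos rfl, if_neg hc] at hp
        refine ih (P ++ [cur]) [] ?_ p hp
        intro q hq
        rcases List.mem_append.mp hq with h1 | h1
        · exact hP q h1
        · simp at h1; subst h1; exact hc
    · simp only [pvGo, if_neg hx] at hp
      exact ih P (cur ++ [x]) hP p hp

-- pvSquash with prev=true never starts with a blank
theorem pvSquash_true_head (xs : List String) (t : List String) :
    pvSquash xs true ≠ "" :: t := by
  induction xs generalizing t with
  | nil => simp [pvSquash]
  | cons x xs ih =>
    by_cases hx : x = ""
    · simpa [pvSquash, hx] using ih t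
    · simp [pvSquash, hx]

-- key correspondence: cur ++ squash(rest) equals the interleaved paragraphs, up to one trailing blank
theorem pvKey (xs : List String) (cur : List String) :
    cur ++ pvSquash xs (cur = []) = pvInter (pvGo xs [] cur) ∨
    cur ++ pvSquash xs (cur = []) = pvInter (pvGo xs [] cur) ++ [""] := by
  induction xs generalizing cur with
  | nil =>
    left
    by_cases hc : cur = []
    · simp [pvSquash, pvGo, pvInter, hc]
    · simp [pvSquash, pvGo, pvInter, hc]
  | cons x xs ih =>
    by_cases hx : x = ""
    · by_cases hc : cur = []
      · subst hx; subst hc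
        have h1 : pvSquash ("" :: xs) (([] : List String) = []) = pvSquash xs true := by
          simp [pvSquash]
        have h2 : pvGo ("" :: xs) [] [] = pvGo xs [] [] := by simp [pvGo]
        rw [h1, h2]
        simpa using ih ([] : List String)
      · subst hx
        have h1 : cur ++ pvSquash ("" :: xs) (decide (cur = [])) = cur ++ "" :: pvSquash xs true := by
          simp [pvSquash, hc]
        have h2 : pvGo ("" :: xs) [] cur = [cur] ++ pvGo xs [] [] := by
          rw [pvGo]
          simp only [if_pos rfl, if_neg hc]
          exact pvGo_prefix xs [cur] []
        rcases ih ([] : List String) with h | h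
        · -- squash xs true = pvInter (pvGo xs [] [])
          simp only [List.nil_append, decide_true] at h
          cases hG : pvGo xs [] [] with
          | nil =>
            -- then squash xs true = [], result is cur ++ [""]
            right
            rw [hG] at h
            simp only [pvInter] at h
            rw [h1, h2, hG]
            simp [pvInter, h]
          | cons q rest =>
            left
            rw [h1, h2, hG]
            rw [hG] at h
            simp only [pvInter, List.singleton_append]
            rw [← h]
            simp
        · -- squash xs true = pvInter (...) ++ [""]
          simp only [List.nil_append, decide_true] at h
          cases hG : pvGo xs [] [] with
          | nil =>
            rw [hG] at h
            simp only [pvInter, List.nil_append] at h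
            exact absurd h (pvSquash_true_head xs [])
          | cons q rest =>
            right
            rw [h1, h2, hG]
            rw [hG] at h
            simp only [pvInter, List.singleton_append]
            rw [h]
            simp
    · -- x nonblank: joins the current paragraph
      have h1 : cur ++ pvSquash (x :: xs) (cur = []) = (cur ++ [x]) ++ pvSquash xs (((cur ++ [x]) : List String) = []) := by
        have : ((x == "") && decide (cur = [])) = false := by simp [hx]
        simp [pvSquash, this, show (x == "") = false by simpa using hx]
      have h2 : pvGo (x :: xs) [] cur = pvGo xs [] (cur ++ [x]) := by
        simp [pvGo, hx]
      rw [h1, h2]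
      exact ih (cur ++ [x])

-- join over an append of nonempty block lists
theorem pvJoin_append (sep : List Char) (ms ns : List (List Char)) (hm : ms ≠ []) (hn : ns ≠ []) :
    PySem.Chars.join sep (ms ++ ns) = PySem.Chars.join sep ms ++ sep ++ PySem.Chars.join sep ns := by
  obtain ⟨m, ms', rfl⟩ := List.exists_cons_of_ne_nil hm
  induction ms' generalizing m with
  | nil =>
    cases ns with
    | nil => simp at hn
    | cons n ns' =>
      simp [PySem.Chars.join_cons_cons, PySem.Chars.join_singleton]
  | cons m2 ms2 ih =>
    have h2 : (m :: m2 :: ms2) ++ ns = m :: m2 :: (ms2 ++ ns) := by simp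
    rw [h2, PySem.Chars.join_cons_cons]
    have h3 : (m2 :: (ms2 ++ ns)) = (m2 :: ms2) ++ ns := by simp
    rw [h3, ih m2 (by simp), PySem.Chars.join_cons_cons]
    simp

theorem pvToListJoin (sep : String) (ys : List String) :
    (PySem.Str.join sep ys).toList = PySem.Chars.join sep.toList (ys.map String.toList) := by
  rw [PySem.Str.toList_join]

theorem pvStrEq (a b : String) (h : a.toList = b.toList) : a = b := by
  have ha := String.asString_toList a
  have hb := String.asString_toList b
  rw [← ha, ← hb, h]

-- "\n".join(pvInter P) = "\n\n".join(map "\n".join P) for nonempty paragraphs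
theorem pvInterJoin (P : List (List String)) (hP : ∀ p ∈ P, p ≠ []) :
    PySem.Str.join "\n" (pvInter P) = PySem.Str.join "\n\n" (P.map (PySem.Str.join "\n")) := by
  induction P with
  | nil => rfl
  | cons p P ih =>
    cases P with
    | nil =>
      -- single paragraph
      apply pvStrEq
      rw [pvToListJoin, pvToListJoin]
      simp only [pvInter, List.map]
      rw [PySem.Chars.join_singleton]
      rw [pvToListJoin]
    | cons q rest =>
      have hp : p ≠ [] := hP p (by simp)
      have hq : q ≠ [] := hP q (by simp)
      have ih2 := ih (fun r hr => hP r (by simp [hr]))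
      apply pvStrEq
      rw [pvToListJoin, pvToListJoin]
      have hLHS : pvInter (p :: q :: rest) = p ++ ([""] ++ pvInter (q :: rest)) := by
        simp [pvInter]
      rw [hLHS]
      have hInterNe : pvInter (q :: rest) ≠ [] := by
        cases rest with
        | nil => simpa [pvInter] using hq
        | cons r rs => simp [pvInter, hq]
      have hmap : ((p ++ ([""] ++ pvInter (q :: rest))).map String.toList)
          = p.map String.toList ++ (([""] ++ pvInter (q :: rest)).map String.toList) := by
        simp
      rw [hmap]
      rw [pvJoin_append _ _ _ (by simpa using hp) (by simp)]
      have hmap2 : (([""] ++ pvInter (q :: rest)).map String.toList)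
          = [([] : List Char)] ++ (pvInter (q :: rest)).map String.toList := by
        simp
      rw [hmap2]
      rw [pvJoin_append _ _ _ (by simp) (by simpa using hInterNe)]
      rw [PySem.Chars.join_singleton]
      have hmap3 : List.map String.toList ((p :: q :: rest).map (PySem.Str.join "\n"))
          = (PySem.Str.join "\n" p).toList :: (PySem.Str.join "\n" q).toList ::
            (rest.map (PySem.Str.join "\n")).map String.toList := by simp
      rw [hmap3, PySem.Chars.join_cons_cons]
      have hthis := congrArg String.toList ih2
      rw [pvToListJoin, pvToListJoin] at hthis
      have hmapq : ((q :: rest).map (PySem.Str.join "\n")).map String.toList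
          = (PySem.Str.join "\n" q).toList :: (rest.map (PySem.Str.join "\n")).map String.toList := by
        simp
      rw [hmapq] at hthis
      rw [← hthis, pvToListJoin]
      have hnl : ("\n" : String).toList = ['\n'] := rfl
      have hnl2 : ("\n\n" : String).toList = ['\n', '\n'] := rfl
      rw [hnl, hnl2]
      simp

-- '\n' is whitespace, so strip eats it from either end of the joined string
theorem pvNlSpace : PySem.Chars.isspace '\n' = true := rfl

theorem pvStrip_cons_nl (l : List Char) :
    PySem.Chars.strip ('\n' :: l) = PySem.Chars.strip l := by
  simp [PySem.Chars.strip, PySem.Chars.lstrip, List.dropWhile, pvNlSpace]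

theorem pvRstrip_snoc_nl (l : List Char) :
    PySem.Chars.rstrip (l ++ ['\n']) = PySem.Chars.rstrip l := by
  simp [PySem.Chars.rstrip, pvNlSpace]

theorem pvStrip_snoc_nl (l : List Char) :
    PySem.Chars.strip (l ++ ['\n']) = PySem.Chars.strip l := by
  unfold PySem.Chars.strip PySem.Chars.lstrip
  rw [List.dropWhile_append]
  by_cases h : (List.dropWhile PySem.Chars.isspace l).isEmpty = true
  · have h0 : List.dropWhile PySem.Chars.isspace l = [] := by
      simpa [List.isEmpty_iff] using h
    simp [h0, List.dropWhile, pvNlSpace]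
  · simp [h, pvRstrip_snoc_nl]

theorem pvStripJoin_cons (ys : List String) :
    PySem.Str.strip (PySem.Str.join "\n" ("" :: ys)) = PySem.Str.strip (PySem.Str.join "\n" ys) := by
  cases ys with
  | nil => rfl
  | cons z zs =>
    unfold PySem.Str.strip
    rw [PySem.Str.toList_join, PySem.Str.toList_join]
    simp only [List.map]
    have : (("" : String).toList) = ([] : List Char) := rfl
    rw [this, PySem.Chars.join_cons_cons]
    have hnl : ("\n" : String).toList = ['\n'] := rfl
    rw [hnl]
    simp [pvStrip_cons_nl]

theorem pvJoin_snoc (ms : List (List Char)) (h : ms ≠ []) :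
    PySem.Chars.join ['\n'] (ms ++ [[]]) = PySem.Chars.join ['\n'] ms ++ ['\n'] := by
  induction ms with
  | nil => simp at h
  | cons m ms ih =>
    cases ms with
    | nil => simp [PySem.Chars.join_cons_cons, PySem.Chars.join_singleton]
    | cons m2 ms2 =>
      have h2 : (m :: m2 :: ms2) ++ [[]] = m :: ((m2 :: ms2) ++ [([] : List Char)]) := by simp
      rw [h2]
      have h3 : (m2 :: ms2) ++ [([] : List Char)] = m2 :: (ms2 ++ [([] : List Char)]) := by simp
      rw [h3, PySem.Chars.join_cons_cons, ← h3, ih (by simp), PySem.Chars.join_cons_cons]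
      simp

theorem pvStripJoin_snoc (ys : List String) :
    PySem.Str.strip (PySem.Str.join "\n" (ys ++ [""])) = PySem.Str.strip (PySem.Str.join "\n" ys) := by
  cases hys : ys with
  | nil => rfl
  | cons z zs =>
    unfold PySem.Str.strip
    rw [PySem.Str.toList_join, PySem.Str.toList_join]
    have hnl : ("\n" : String).toList = ['\n'] := rfl
    rw [hnl]
    have : (ys ++ [""]).map String.toList = ys.map String.toList ++ [[]] := by simp
    rw [← hys, this, pvJoin_snoc _ (by simp [hys]), pvStrip_snoc_nl]

-- A-side trimming lemmas
theorem pvSquash_true_popLead (xs : List String) :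
    pvSquash xs true = pvSquash (pvPopLead xs) false := by
  induction xs with
  | nil => rfl
  | cons x xs ih =>
    by_cases hx : x = ""
    · simp [pvSquash, pvPopLead, hx, ih]
    · simp [pvSquash, pvPopLead, hx]

theorem pvPopTrail_nil_blank (xs : List String) (h : pvPopTrail xs = []) :
    ∀ y ∈ xs, y = "" := by
  induction xs with
  | nil => simp
  | cons x xs ih =>
    intro y hy
    cases hT : pvPopTrail xs with
    | nil =>
      have hx : x = "" := by
        by_contra hx
        simp [pvPopTrail, hT, hx] at h
      rcases List.mem_cons.mp hy with hy | hy
      · exact hy ▸ hx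
      · exact ih (by simpa using hT) y hy
    | cons z zs => simp [pvPopTrail, hT] at h

theorem pvSquash_true_allblank (xs : List String) (h : ∀ y ∈ xs, y = "") :
    pvSquash xs true = [] := by
  induction xs with
  | nil => rfl
  | cons x xs ih =>
    have hx : x = "" := h x (by simp)
    simp [pvSquash, hx, ih (fun y hy => h y (by simp [hy]))]

theorem pvSquash_false_allblank (xs : List String) (h : ∀ y ∈ xs, y = "") :
    pvSquash xs false = [] ∨ pvSquash xs false = [""] := by
  cases xs with
  | nil => left; rfl
  | cons x xs =>
    right
    have hx : x = "" := h x (by simp)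
    subst hx
    simp [pvSquash, pvSquash_true_allblank xs (fun y hy => h y (by simp [hy]))]

theorem pvSquash_popTrail (xs : List String) (b : Bool) :
    pvSquash xs b = pvSquash (pvPopTrail xs) b ∨
    pvSquash xs b = pvSquash (pvPopTrail xs) b ++ [""] := by
  induction xs generalizing b with
  | nil => left; rfl
  | cons x xs ih =>
    cases hT : pvPopTrail xs with
    | nil =>
      have hbl : ∀ y ∈ xs, y = "" := pvPopTrail_nil_blank xs hT
      by_cases hx : x = ""
      · subst hx
        cases b with
        | true =>
          left
          simp [pvSquash, pvPopTrail, hT, pvSquash_true_allblank xs hbl]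
        | false =>
          right
          simp [pvSquash, pvPopTrail, hT, pvSquash_true_allblank xs hbl]
      · rcases pvSquash_false_allblank xs hbl with h | h
        · left
          have : (x == "") = false := by simpa using hx
          simp [pvSquash, pvPopTrail, hT, this, h]
        · right
          have : (x == "") = false := by simpa using hx
          simp [pvSquash, pvPopTrail, hT, this, h]
    | cons z zs =>
      have hP : pvPopTrail (x :: xs) = x :: z :: zs := by
        simp [pvPopTrail, hT]
      by_cases hc : ((x == "") && b) = true
      · have e1 : pvSquash (x :: xs) b = pvSquash xs b := by simp [pvSquash, hc]
        have e2 : pvSquash (x :: z :: zs) b = pvSquash (z :: zs) b := by simp [pvSquash, hc]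
        rcases ih b with h | h <;> rw [hT] at h
        · left; rw [hP, e1, e2, h]
        · right; rw [hP, e1, e2, h]
      · have e1 : pvSquash (x :: xs) b = x :: pvSquash xs (x == "") := by simp [pvSquash, hc]
        have e2 : pvSquash (x :: z :: zs) b = x :: pvSquash (z :: zs) (x == "") := by
          simp [pvSquash, hc]
        rcases ih (x == "") with h | h <;> rw [hT] at h
        · left; rw [hP, e1, e2, h]
        · right; rw [hP, e1, e2, h]; simp

theorem pvStep_lead (lines : List String) :
    PySem.Str.strip (PySem.Str.join "\n" (pvSquash lines false)) =
    PySem.Str.strip (PySem.Str.join "\n" (pvSquash (pvPopLead lines) false)) := by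
  induction lines with
  | nil => rfl
  | cons x xs ih =>
    by_cases hx : x = ""
    · subst hx
      have h1 : pvSquash ("" :: xs) false = "" :: pvSquash xs true := by simp [pvSquash]
      rw [h1, pvStripJoin_cons, pvSquash_true_popLead]
      simp [pvPopLead]
    · simp [pvPopLead, hx]

theorem pvSquash_false_true (xs : List String) :
    pvSquash xs false = pvSquash xs true ∨ pvSquash xs false = "" :: pvSquash xs true := by
  cases xs with
  | nil => left; rfl
  | cons x xs =>
    by_cases hx : x = ""
    · right; simp [pvSquash, hx]
    · left; simp [pvSquash, hx]

theorem pvMain (lines : List String) : clean_block_py lines = clean_block_py_alt lines := by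
  -- A's side reduced to strip(join(squash lines false))
  have hA : clean_block_py lines =
      PySem.Str.strip (PySem.Str.join "\n" (pvSquash lines false)) := by
    show PySem.Str.strip (PySem.Str.join "\n"
        ((pvPopTrail (pvPopLead lines)).foldl
          (fun (st : List String × Bool) line =>
            let blank := line == ""
            if blank && st.2 then st else (st.1 ++ [line], blank))
          ([], false)).1) = _
    rw [pvFoldA, List.nil_append, pvStep_lead lines]
    rcases pvSquash_popTrail (pvPopLead lines) false with h | h
    · rw [h]
    · rw [h, pvStripJoin_snoc]
  -- B's side reduced to strip(join2 (pvGo lines [] []))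
  have hB : clean_block_py_alt lines =
      PySem.Str.strip (PySem.Str.join "\n\n"
        ((pvGo lines [] []).map (PySem.Str.join "\n"))) := by
    show PySem.Str.strip (PySem.Str.join "\n\n"
        ((if (lines.foldl
            (fun (st : List (List String) × List String) line =>
              if line == "" then
                (if st.2 == ([] : List String) then st else (st.1 ++ [st.2], []))
              else (st.1, st.2 ++ [line]))
            ([], [])).2 == ([] : List String)
          then (lines.foldl
            (fun (st : List (List String) × List String) line =>
              if line == "" then
                (if st.2 == ([] : List String) then st else (st.1 ++ [st.2], []))
              else (st.1, st.2 ++ [line]))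
            ([], [])).1
          else (lines.foldl
            (fun (st : List (List String) × List String) line =>
              if line == "" then
                (if st.2 == ([] : List String) then st else (st.1 ++ [st.2], []))
              else (st.1, st.2 ++ [line]))
            ([], [])).1 ++ [(lines.foldl
            (fun (st : List (List String) × List String) line =>
              if line == "" then
                (if st.2 == ([] : List String) then st else (st.1 ++ [st.2], []))
              else (st.1, st.2 ++ [line]))
            ([], [])).2]).map (PySem.Str.join "\n"))) = _
    rw [pvFoldB lines [] []]
  rw [hA, hB]
  have hNe : ∀ p ∈ pvGo lines [] [], p ≠ [] := pvGo_ne_nil lines [] [] (by simp)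
  rw [← pvInterJoin _ hNe]
  -- squash lines false → squash lines true → pvInter (pvGo lines [] [])
  have step1 : PySem.Str.strip (PySem.Str.join "\n" (pvSquash lines false)) =
      PySem.Str.strip (PySem.Str.join "\n" (pvSquash lines true)) := by
    rcases pvSquash_false_true lines with h | h
    · rw [h]
    · rw [h, pvStripJoin_cons]
  rw [step1]
  have hK := pvKey lines ([] : List String)
  simp only [List.nil_append, decide_true] at hK
  rcases hK with h | h
  · rw [h]
  · rw [h, pvStripJoin_snoc]

-- ===== VERDICT (by name: the statement is the Claim_ definition above) =====
theorem clean_block_py_spec : Claim_equal_clean_block_py := by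
  intro lines _
  unfold Spec_clean_block_py
  exact pvMain lines
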